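-- pv_equiv track=rewrite | github.com/MachineLearning-Nerd/Codathon | day1.py | books_on_shelf
-- ===== SOURCE A (Python) =====
-- def books_on_shelf(data, K):
--     while(1):
--         if data[0] <= K:
--             data.pop(0)
--         elif data[-1] <= K:
--             data.pop(-1)
--         else:
--             return len(data)
-- ===== SOURCE B (Python) =====
-- def books_on_shelf(data, K):
--     kept = [i for i, x in enumerate(data) if x > K]
--     return kept[-1] - kept[0] + 1 if kept else 0
-- ===== Notes on version B (the rewrite author's own statement) =====
-- stated objective: simpler
-- what changed: Replaces A's destructive loop that repeatedly pops elements <= K from both ends of the list with a single non-mutating pass collecting the indices of elements > K and returning last - first + 1.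
import Mathlib
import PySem

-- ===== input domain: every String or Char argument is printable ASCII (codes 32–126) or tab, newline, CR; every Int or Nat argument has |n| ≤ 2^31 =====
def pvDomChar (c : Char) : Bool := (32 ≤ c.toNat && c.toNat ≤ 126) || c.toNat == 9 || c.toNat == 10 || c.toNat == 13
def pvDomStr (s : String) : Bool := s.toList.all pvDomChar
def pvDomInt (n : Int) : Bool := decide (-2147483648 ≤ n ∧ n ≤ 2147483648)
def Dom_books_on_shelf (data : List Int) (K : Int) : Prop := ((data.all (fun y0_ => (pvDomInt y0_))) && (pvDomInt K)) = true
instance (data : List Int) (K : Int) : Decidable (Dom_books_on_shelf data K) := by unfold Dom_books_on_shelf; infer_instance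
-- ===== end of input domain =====

-- B replaces A's destructive double-ended popping loop with a single non-mutating pass collecting
-- the indices of elements > K (answer = last index - first index + 1): simpler, no mutation.
-- A mutates its argument (pops from both ends) while B does not; the equivalence proved here is about the RETURN value only.


-- ===== PORT A =====
-- while(1): pop front while data[0] <= K, else pop back while data[-1] <= K, else return len(data).
-- On [] (data[0] raises IndexError in Python) the port returns 0; Pre_ excludes those inputs.
def books_on_shelf (data : List Int) (K : Int) : Int :=
  match data with
  | [] => 0
  | x :: rest =>
    if x ≤ K then books_on_shelf rest K
    else if (x :: rest).getLast (List.cons_ne_nil x rest) ≤ K then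
      books_on_shelf (x :: rest).dropLast K
    else ((x :: rest).length : Int)
termination_by data.length
decreasing_by
  · simp
  · simp

-- ===== PORT B =====
-- kept = [i for i, x in enumerate(data) if x > K]
def keptIdx (data : List Int) (K : Int) : List Int :=
  ((PySem.List.enumerate data).filter (fun p => decide (K < p.2))).map Prod.fst

-- return kept[-1] - kept[0] + 1 if kept else 0
def books_on_shelf_alt (data : List Int) (K : Int) : Int :=
  match keptIdx data K with
  | [] => 0
  | h :: t => (h :: t).getLast (List.cons_ne_nil h t) - h + 1

-- ===== PRECONDITION & SPEC =====
-- Pre_ excludes exactly the inputs on which Python A raises IndexError: lists whose every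
-- element is ≤ K (including the empty list) — A pops until empty and then indexes data[0].
def Pre_books_on_shelf (data : List Int) (K : Int) : Prop := ∃ x ∈ data, K < x
instance (data : List Int) (K : Int) : Decidable (Pre_books_on_shelf data K) := by unfold Pre_books_on_shelf; infer_instance
def pvWitness_books_on_shelf : List Int × Int := ([2], 1)

def Spec_books_on_shelf (data : List Int) (K : Int) (out : Int) : Prop := out = books_on_shelf_alt data K
instance (data : List Int) (K : Int) (out : Int) : Decidable (Spec_books_on_shelf data K out) := by unfold Spec_books_on_shelf; infer_instance

-- ===== CLAIM (what is proved, stated in full; the proofs are below) =====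
def Claim_equal_books_on_shelf : Prop := ∀ (data : List Int) (K : Int), Dom_books_on_shelf data K → Pre_books_on_shelf data K → Spec_books_on_shelf data K (books_on_shelf data K)

-- ===== LEMMAS AND PROOFS =====

lemma enum_shift (xs : List Int) (s t : Int) :
    PySem.List.enumerate xs (s + t) = (PySem.List.enumerate xs t).map (fun p => (p.1 + s, p.2)) := by
  induction xs generalizing t with
  | nil => simp [PySem.List.enumerate_nil]
  | cons x xs ih =>
    simp [PySem.List.enumerate_cons]
    constructor
    · omega
    · have := ih (t + 1)
      rw [show s + t + 1 = s + (t + 1) by ring] at *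
      exact this

lemma kept_cons (x : Int) (xs : List Int) (K : Int) :
    keptIdx (x :: xs) K = (if K < x then [(0 : Int)] else []) ++ (keptIdx xs K).map (· + 1) := by
  unfold keptIdx
  rw [PySem.List.enumerate_cons, show (0 : Int) + 1 = 1 + 0 by ring, enum_shift xs 1 0]
  simp only [List.filter_cons, List.filter_map, List.map_map, decide_eq_true_eq]
  split_ifs with h <;> simp [Function.comp_def]

lemma kept_append_last (xs : List Int) (a K : Int) :
    keptIdx (xs ++ [a]) K = keptIdx xs K ++ (if K < a then [(xs.length : Int)] else []) := by
  unfold keptIdx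
  rw [PySem.List.enumerate_append]
  simp [PySem.List.enumerate_cons, PySem.List.enumerate_nil]
  split_ifs with h <;> simp [h]

lemma alt_of_kept_nil (data : List Int) (K : Int) (h : keptIdx data K = []) :
    books_on_shelf_alt data K = 0 := by
  unfold books_on_shelf_alt; rw [h]

lemma alt_of_head_last (data : List Int) (K h l : Int)
    (hh : (keptIdx data K).head? = some h) (hl : (keptIdx data K).getLast? = some l) :
    books_on_shelf_alt data K = l - h + 1 := by
  unfold books_on_shelf_alt
  cases hk : keptIdx data K with
  | nil => rw [hk] at hh; simp at hh
  | cons a t =>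
    rw [hk] at hh hl
    simp at hh
    rw [List.getLast?_eq_some_getLast (List.cons_ne_nil a t)] at hl
    simp at hl
    show (a :: t).getLast (List.cons_ne_nil a t) - a + 1 = l - h + 1
    omega

lemma alt_cons_le (x : Int) (xs : List Int) (K : Int) (hx : x ≤ K) :
    books_on_shelf_alt (x :: xs) K = books_on_shelf_alt xs K := by
  have hk : keptIdx (x :: xs) K = (keptIdx xs K).map (· + 1) := by
    rw [kept_cons]; simp [not_lt.mpr hx]
  cases hxs : keptIdx xs K with
  | nil =>
    rw [alt_of_kept_nil _ _ (by rw [hk, hxs]; simp), alt_of_kept_nil _ _ hxs]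
  | cons a t =>
    have h1 := alt_of_head_last (x :: xs) K (a + 1) (((a :: t).getLast (List.cons_ne_nil a t)) + 1)
      (by rw [hk, hxs]; simp)
      (by rw [hk, hxs, List.getLast?_map, List.getLast?_eq_some_getLast (List.cons_ne_nil a t)]; simp)
    have h2 := alt_of_head_last xs K a ((a :: t).getLast (List.cons_ne_nil a t))
      (by rw [hxs]; simp)
      (by rw [hxs, List.getLast?_eq_some_getLast (List.cons_ne_nil a t)])
    rw [h1, h2]; ring

lemma alt_congr (d1 d2 : List Int) (K : Int) (h : keptIdx d1 K = keptIdx d2 K) :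
    books_on_shelf_alt d1 K = books_on_shelf_alt d2 K := by
  unfold books_on_shelf_alt; rw [h]

lemma alt_full (x : Int) (rest : List Int) (K : Int) (hx : K < x)
    (hl : K < (x :: rest).getLast (List.cons_ne_nil x rest)) :
    books_on_shelf_alt (x :: rest) K = ((x :: rest).length : Int) := by
  have hne : x :: rest ≠ [] := List.cons_ne_nil x rest
  have hdecomp : (x :: rest).dropLast ++ [(x :: rest).getLast hne] = x :: rest :=
    List.dropLast_append_getLast hne
  have hh : (keptIdx (x :: rest) K).head? = some 0 := by
    rw [kept_cons, if_pos hx]; simp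
  have hl2 : (keptIdx (x :: rest) K).getLast? = some (((x :: rest).dropLast.length : Int)) := by
    conv_lhs => rw [← hdecomp]
    rw [kept_append_last, if_pos hl]
    simp
  rw [alt_of_head_last (x :: rest) K 0 _ hh hl2]
  have h3 : (x :: rest).dropLast.length = (x :: rest).length - 1 := List.length_dropLast
  have hdl : 1 ≤ (x :: rest).length := by simp
  omega

lemma pre_mem_dropLast (d : List Int) (K : Int) (hne : d ≠ [])
    (hlast : d.getLast hne ≤ K) (hpre : ∃ x ∈ d, K < x) : ∃ x ∈ d.dropLast, K < x := by
  obtain ⟨w, hw, hKw⟩ := hpre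
  refine ⟨w, ?_, hKw⟩
  have hdecomp : d.dropLast ++ [d.getLast hne] = d := List.dropLast_append_getLast hne
  rw [← hdecomp] at hw
  rcases List.mem_append.mp hw with h | h
  · exact h
  · simp at h; subst h; omega

lemma main_eq : ∀ (n : Nat) (data : List Int) (K : Int), data.length ≤ n →
    (∃ x ∈ data, K < x) → books_on_shelf data K = books_on_shelf_alt data K := by
  intro n
  induction n with
  | zero =>
    intro data K hlen hpre
    have : data = [] := List.eq_nil_of_length_eq_zero (Nat.le_zero.mp hlen)
    subst this; simp at hpre
  | succ m ih =>
    intro data K hlen hpre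
    match data with
    | [] => simp at hpre
    | x :: rest =>
      rw [books_on_shelf]
      by_cases hx : x ≤ K
      · rw [if_pos hx]
        have hpre' : ∃ y ∈ rest, K < y := by
          obtain ⟨w, hw, hKw⟩ := hpre
          rcases List.mem_cons.mp hw with h | h
          · subst h; omega
          · exact ⟨w, h, hKw⟩
        rw [ih rest K (by simp at hlen; omega) hpre', alt_cons_le x rest K hx]
      · rw [if_neg hx]
        by_cases hlast : (x :: rest).getLast (List.cons_ne_nil x rest) ≤ K
        · rw [if_pos hlast]
          have hpre' := pre_mem_dropLast (x :: rest) K (List.cons_ne_nil x rest) hlast hpre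
          rw [ih _ K (by simp [List.length_dropLast] at *; omega) hpre']
          exact alt_congr _ _ K (by
            conv_rhs => rw [← List.dropLast_append_getLast (List.cons_ne_nil x rest)]
            rw [kept_append_last, if_neg (not_lt.mpr hlast)]
            simp)
        · rw [if_neg hlast]
          exact (alt_full x rest K (by omega) (by omega)).symm

-- ===== VERDICT (by name: the statement is the Claim_ definition above) =====
theorem books_on_shelf_spec : Claim_equal_books_on_shelf := by
  intro data K _ hpre
  unfold Spec_books_on_shelf
  exact main_eq data.length data K le_rfl hpre
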